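-- pv_equiv track=rewrite | github.com/IvanYachUkr/TerraPulse | scripts/run_mlp_mega_sweep.py | partition_features
-- ===== SOURCE A (Python) =====
-- def partition_features(all_cols):
--     """Split feature columns into semantic groups."""
--     bands = []
--     indices = []
--     deltas = []
--     tasseled_cap = []
--     other = []
--
--     band_prefixes = {"B02", "B03", "B04", "B05", "B06", "B07", "B08", "B8A", "B11", "B12"}
--     index_prefixes = {"NDVI", "NDWI", "NDBI", "NDMI", "NBR", "SAVI", "BSI", "NDRE1", "NDRE2",
--                       "EVI", "MSAVI", "CRI1", "CRI2", "MCARI", "MNDWI"}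
--
--     for i, col in enumerate(all_cols):
--         prefix = col.split("_")[0]
--         if col.startswith("delta"):
--             deltas.append(i)
--         elif prefix in band_prefixes:
--             bands.append(i)
--         elif prefix in index_prefixes:
--             indices.append(i)
--         elif prefix == "TC":
--             tasseled_cap.append(i)
--         else:
--             other.append(i)
--
--     return {
--         "all": list(range(len(all_cols))),
--         "bands": bands,
--         "indices": indices + tasseled_cap,
--         "deltas": deltas,
--         "no_deltas": bands + indices + tasseled_cap + other,
--         "bands_and_indices": bands + indices + tasseled_cap,
--         "other": other,
--     }
-- ===== SOURCE B (Python) =====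
-- def partition_features(all_cols):
--     """Split feature columns into semantic groups."""
--     band_prefixes = {"B02", "B03", "B04", "B05", "B06", "B07", "B08", "B8A", "B11", "B12"}
--     index_prefixes = {"NDVI", "NDWI", "NDBI", "NDMI", "NBR", "SAVI", "BSI", "NDRE1", "NDRE2",
--                       "EVI", "MSAVI", "CRI1", "CRI2", "MCARI", "MNDWI"}
--
--     def prefix(c):
--         return c.split("_")[0]
--
--     deltas = [i for i, c in enumerate(all_cols) if c.startswith("delta")]
--     bands = [i for i, c in enumerate(all_cols)
--              if not c.startswith("delta") and prefix(c) in band_prefixes]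
--     indices = [i for i, c in enumerate(all_cols)
--                if not c.startswith("delta") and prefix(c) not in band_prefixes
--                and prefix(c) in index_prefixes]
--     tasseled_cap = [i for i, c in enumerate(all_cols)
--                     if not c.startswith("delta") and prefix(c) not in band_prefixes
--                     and prefix(c) not in index_prefixes and prefix(c) == "TC"]
--     other = [i for i, c in enumerate(all_cols)
--              if not c.startswith("delta") and prefix(c) not in band_prefixes
--              and prefix(c) not in index_prefixes and prefix(c) != "TC"]
--
--     return {
--         "all": list(range(len(all_cols))),
--         "bands": bands,
--         "indices": indices + tasseled_cap,
--         "deltas": deltas,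
--         "no_deltas": bands + indices + tasseled_cap + other,
--         "bands_and_indices": bands + indices + tasseled_cap,
--         "other": other,
--     }
-- ===== Notes on version B (the rewrite author's own statement) =====
-- stated objective: alternative
-- what changed: Replaces A's single stateful branching pass with five independent list-comprehension scans, each with a self-contained predicate encoding the delta-first/band/index/TC priority.
import Mathlib
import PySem

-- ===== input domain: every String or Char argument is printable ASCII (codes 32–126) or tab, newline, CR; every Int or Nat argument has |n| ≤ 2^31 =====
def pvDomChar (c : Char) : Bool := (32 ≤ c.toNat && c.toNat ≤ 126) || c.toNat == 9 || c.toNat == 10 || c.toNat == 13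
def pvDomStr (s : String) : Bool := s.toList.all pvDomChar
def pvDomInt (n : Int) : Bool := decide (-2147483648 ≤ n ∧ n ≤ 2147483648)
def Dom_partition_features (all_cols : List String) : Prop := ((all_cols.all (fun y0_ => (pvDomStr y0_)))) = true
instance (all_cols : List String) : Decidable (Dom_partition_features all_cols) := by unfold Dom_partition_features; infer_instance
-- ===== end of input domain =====

-- ===== PORT A =====
-- B restates A's single branching pass as five independent filtering scans,
-- each with a self-contained predicate encoding A's delta/band/index/TC priority (objective: alternative).

-- shared data: the prefix sets and the prefix extractor (col.split("_")[0]; splitOn never returns [])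
def pvBandPrefixes : PySem.Set String :=
  PySem.Set.ofList ["B02", "B03", "B04", "B05", "B06", "B07", "B08", "B8A", "B11", "B12"]

def pvIndexPrefixes : PySem.Set String :=
  PySem.Set.ofList ["NDVI", "NDWI", "NDBI", "NDMI", "NBR", "SAVI", "BSI", "NDRE1", "NDRE2",
                    "EVI", "MSAVI", "CRI1", "CRI2", "MCARI", "MNDWI"]

-- c.split("_")[0]: sep ≠ "" so split? returns some, and the result is never empty
def pvPrefix (c : String) : String := ((PySem.Str.split? c "_").getD []).headD ""

-- ===== PORT A =====
-- one step of A's for-loop over enumerate(all_cols): state = (bands, indices, deltas, tasseled_cap, other)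
def pvStepA (st : List Int × List Int × List Int × List Int × List Int) (p : Int × String) :
    List Int × List Int × List Int × List Int × List Int :=
  match st with
  | (bands, indices, deltas, tc, other) =>
    let pre := pvPrefix p.2
    if PySem.Str.startswith p.2 "delta" then (bands, indices, deltas ++ [p.1], tc, other)
    else if PySem.Set.contains pvBandPrefixes pre then (bands ++ [p.1], indices, deltas, tc, other)
    else if PySem.Set.contains pvIndexPrefixes pre then (bands, indices ++ [p.1], deltas, tc, other)
    else if pre == "TC" then (bands, indices, deltas, tc ++ [p.1], other)
    else (bands, indices, deltas, tc, other ++ [p.1])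

def partition_features (all_cols : List String) : List (String × List Int) :=
  match (PySem.List.enumerate all_cols).foldl pvStepA ([], [], [], [], []) with
  | (bands, indices, deltas, tc, other) =>
    [("all", PySem.List.pyRange 0 (all_cols.length : Int) 1),
     ("bands", bands),
     ("indices", indices ++ tc),
     ("deltas", deltas),
     ("no_deltas", bands ++ indices ++ tc ++ other),
     ("bands_and_indices", bands ++ indices ++ tc),
     ("other", other)]

-- ===== PORT B =====
-- B's comprehension guards, one self-contained predicate per group
def pvSelDeltas (p : Int × String) : Option Int :=
  if PySem.Str.startswith p.2 "delta" then some p.1 else none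

def pvSelBands (p : Int × String) : Option Int :=
  if !PySem.Str.startswith p.2 "delta" && PySem.Set.contains pvBandPrefixes (pvPrefix p.2)
  then some p.1 else none

def pvSelIndices (p : Int × String) : Option Int :=
  if !PySem.Str.startswith p.2 "delta" && !PySem.Set.contains pvBandPrefixes (pvPrefix p.2)
     && PySem.Set.contains pvIndexPrefixes (pvPrefix p.2)
  then some p.1 else none

def pvSelTC (p : Int × String) : Option Int :=
  if !PySem.Str.startswith p.2 "delta" && !PySem.Set.contains pvBandPrefixes (pvPrefix p.2)
     && !PySem.Set.contains pvIndexPrefixes (pvPrefix p.2) && (pvPrefix p.2 == "TC")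
  then some p.1 else none

def pvSelOther (p : Int × String) : Option Int :=
  if !PySem.Str.startswith p.2 "delta" && !PySem.Set.contains pvBandPrefixes (pvPrefix p.2)
     && !PySem.Set.contains pvIndexPrefixes (pvPrefix p.2) && !(pvPrefix p.2 == "TC")
  then some p.1 else none

def partition_features_alt (all_cols : List String) : List (String × List Int) :=
  let pairs := PySem.List.enumerate all_cols
  let deltas := pairs.filterMap pvSelDeltas
  let bands := pairs.filterMap pvSelBands
  let indices := pairs.filterMap pvSelIndices
  let tc := pairs.filterMap pvSelTC
  let other := pairs.filterMap pvSelOther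
  [("all", PySem.List.pyRange 0 (all_cols.length : Int) 1),
   ("bands", bands),
   ("indices", indices ++ tc),
   ("deltas", deltas),
   ("no_deltas", bands ++ indices ++ tc ++ other),
   ("bands_and_indices", bands ++ indices ++ tc),
   ("other", other)]

-- ===== PRECONDITION & SPEC =====
def Spec_partition_features (all_cols : List String) (out : List (String × List Int)) : Prop := out = partition_features_alt all_cols
instance (all_cols : List String) (out : List (String × List Int)) : Decidable (Spec_partition_features all_cols out) := by unfold Spec_partition_features; infer_instance

-- ===== CLAIM (what is proved, stated in full; the proofs are below) =====
def Claim_equal_partition_features : Prop := ∀ (all_cols : List String), Dom_partition_features all_cols → Spec_partition_features all_cols (partition_features all_cols)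

-- ===== LEMMAS AND PROOFS =====

lemma pv_tc_not_band : "TC" ∉ pvBandPrefixes := by decide
lemma pv_tc_not_index : "TC" ∉ pvIndexPrefixes := by decide

-- A's loop result, characterised component-wise by B's five filters
lemma pv_loopA (l : List (Int × String)) :
    ∀ (b i d t o : List Int),
    l.foldl pvStepA (b, i, d, t, o) =
      (b ++ l.filterMap pvSelBands, i ++ l.filterMap pvSelIndices, d ++ l.filterMap pvSelDeltas,
       t ++ l.filterMap pvSelTC, o ++ l.filterMap pvSelOther) := by
  induction l with
  | nil => intro b i d t o; simp
  | cons p l ih =>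
    intro b i d t o
    simp only [List.foldl_cons, List.filterMap_cons]
    by_cases h1 : PySem.Chars.startswith p.2.toList ['d', 'e', 'l', 't', 'a'] = true
    all_goals by_cases h2 : pvPrefix p.2 ∈ pvBandPrefixes
    all_goals by_cases h3 : pvPrefix p.2 ∈ pvIndexPrefixes
    all_goals by_cases h4 : pvPrefix p.2 = "TC"
    all_goals simp [pvStepA, pvSelDeltas, pvSelBands, pvSelIndices, pvSelTC, pvSelOther,
      h1, h2, h3, h4, pv_tc_not_band, pv_tc_not_index, ih]

-- ===== VERDICT (by name: the statement is the Claim_ definition above) =====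
theorem partition_features_spec : Claim_equal_partition_features := by
  intro all_cols _
  show partition_features all_cols = partition_features_alt all_cols
  simp [partition_features, partition_features_alt, pv_loopA]
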